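-- pv_equiv track=rewrite | github.com/alusci/dsa | bit_operations/min_flips_binary_alternating.py | calculate_flips
-- ===== SOURCE A (Python) =====
-- from collections import deque
--
-- def calculate_flips(dq: deque):
--     # Zero even pattern
--     flips_zero_even = 0
--     flips_one_even = 0
--     for i in range(len(dq)):
--         if i % 2 == 0:
--             if dq[i] == "1":
--                 flips_zero_even += 1
--             else:
--                 flips_one_even += 1
--         elif i % 2 != 0:
--             if dq[i] == "0":
--                 flips_zero_even += 1
--             else:
--                 flips_one_even += 1
--
--     return min(flips_zero_even, flips_one_even)
-- ===== SOURCE B (Python) =====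
-- def calculate_flips(dq):
--     # staged passes over strided views: even/odd positions are taken with slices,
--     # library .count does the tallying; no explicit loop, index or parity branch.
--     lst = list(dq)
--     z = lst[0::2].count("1") + lst[1::2].count("0")
--     return min(z, len(lst) - z)
-- ===== Notes on version B (the rewrite author's own statement) =====
-- stated objective: idiomatic
-- what changed: Replaces A's index loop with four parity branches and two running counters by two strided slices (even/odd positions) tallied with list.count, taking min(z, n-z); no explicit loop or branch remains.
import Mathlib
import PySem

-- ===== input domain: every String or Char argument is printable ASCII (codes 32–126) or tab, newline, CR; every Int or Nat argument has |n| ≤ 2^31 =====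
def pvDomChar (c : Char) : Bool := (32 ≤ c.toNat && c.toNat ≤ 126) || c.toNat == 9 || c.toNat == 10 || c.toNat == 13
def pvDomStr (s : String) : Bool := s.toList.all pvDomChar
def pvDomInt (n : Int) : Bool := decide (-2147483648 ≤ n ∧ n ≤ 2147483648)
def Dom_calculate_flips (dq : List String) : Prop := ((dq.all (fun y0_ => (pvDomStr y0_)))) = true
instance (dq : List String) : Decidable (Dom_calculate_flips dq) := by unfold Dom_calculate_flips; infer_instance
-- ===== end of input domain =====

-- B tallies the even- and odd-position strided slices with list.count instead of A's
-- four-branch index loop with two running counters; objective: idiomatic.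

-- ===== PORT A =====
-- A's loop body: state = (flips_zero_even, flips_one_even), i the loop index
def pvStepA (dq : List String) (st : Int × Int) (i : Int) : Int × Int :=
  if i % 2 == 0 then
    if PySem.List.pyGetD dq i "" == "1" then (st.1 + 1, st.2) else (st.1, st.2 + 1)
  else if i % 2 != 0 then
    if PySem.List.pyGetD dq i "" == "0" then (st.1 + 1, st.2) else (st.1, st.2 + 1)
  else st

def calculate_flips (dq : List String) : Int :=
  let st := (PySem.List.pyRange 0 (dq.length : Int) 1).foldl (pvStepA dq) (0, 0)
  min st.1 st.2

-- ===== PORT B =====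
-- lst[0::2] / lst[1::2] are PySem.List.slice? with step 2 (step ≠ 0, so never none)
def calculate_flips_alt (dq : List String) : Int :=
  let lst := dq
  let z : Int :=
    (PySem.List.count ((PySem.List.slice? lst (some 0) none 2).getD []) "1" : Int)
  + (PySem.List.count ((PySem.List.slice? lst (some 1) none 2).getD []) "0" : Int)
  min z ((lst.length : Int) - z)

-- ===== PRECONDITION & SPEC =====
def Spec_calculate_flips (dq : List String) (out : Int) : Prop := out = calculate_flips_alt dq
instance (dq : List String) (out : Int) : Decidable (Spec_calculate_flips dq out) := by unfold Spec_calculate_flips; infer_instance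

-- ===== CLAIM (what is proved, stated in full; the proofs are below) =====
def Claim_equal_calculate_flips : Prop := ∀ (dq : List String), Dom_calculate_flips dq → Spec_calculate_flips dq (calculate_flips dq)

-- ===== LEMMAS AND PROOFS =====

-- "position p.1 holds the 0101…-pattern breaker" predicate behind A's branch structure
def pvMatchP (p : Int × String) : Bool := p.2 == (if p.1 % 2 == 0 then "1" else "0")

-- even-position / odd-position sublists (one-step mutual recursion)
mutual
def pvEvens : List String → List String
  | [] => []
  | x :: r => x :: pvOdds r
def pvOdds : List String → List String
  | [] => []
  | _ :: r => pvEvens r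
end

theorem pvA_foldl (dq : List String) (l : List Int) (z o : Int) :
    l.foldl (pvStepA dq) (z, o)
      = (z + ((l.countP (fun i => pvMatchP (i, PySem.List.pyGetD dq i ""))) : Int),
         o + ((l.length : Int)
              - ((l.countP (fun i => pvMatchP (i, PySem.List.pyGetD dq i ""))) : Int))) := by
  induction l generalizing z o with
  | nil => simp
  | cons i l ih =>
    rw [List.foldl_cons, List.countP_cons]
    by_cases h : pvMatchP (i, PySem.List.pyGetD dq i "")
    · have hstep : pvStepA dq (z, o) i = (z + 1, o) := by
        by_cases he : i % 2 == 0
        · have : PySem.List.pyGetD dq i "" == "1" := by simpa [pvMatchP, he] using h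
          simp [pvStepA, he, this]
        · have : PySem.List.pyGetD dq i "" == "0" := by simpa [pvMatchP, he] using h
          have hne : (i % 2 != 0) = true := by simpa using he
          simp [pvStepA, he, hne, this]
      rw [hstep, ih]
      simp only [h, if_true, List.length_cons, Prod.mk.injEq]
      push_cast; omega
    · have hstep : pvStepA dq (z, o) i = (z, o + 1) := by
        by_cases he : i % 2 == 0
        · have : ¬ (PySem.List.pyGetD dq i "" == "1") = true := by
            simpa [pvMatchP, he] using h
          simp [pvStepA, he, this]
        · have : ¬ (PySem.List.pyGetD dq i "" == "0") = true := by
            simpa [pvMatchP, he] using h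
          have hne : (i % 2 != 0) = true := by simpa using he
          simp [pvStepA, he, hne, this]
      rw [hstep, ih]
      simp only [h, List.length_cons, Prod.mk.injEq]
      push_cast; omega

theorem pvCount_bridge (dq : List String) :
    (PySem.List.pyRange 0 (dq.length : Int) 1).countP
          (fun i => pvMatchP (i, PySem.List.pyGetD dq i ""))
      = (PySem.List.enumerate dq 0).countP pvMatchP := by
  rw [PySem.List.enumerate_eq_map_pyRange dq "", List.countP_map]
  exact (List.countP_congr (fun a _ => Iff.rfl)).symm

-- A's match count over enumerate, split by the parity of the start index
theorem pvEnumCount (dq : List String) : ∀ (s : Int),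
    (PySem.List.enumerate dq s).countP pvMatchP
      = if s % 2 == 0 then (pvEvens dq).count "1" + (pvOdds dq).count "0"
        else (pvEvens dq).count "0" + (pvOdds dq).count "1" := by
  induction dq with
  | nil => intro s; simp [PySem.List.enumerate_nil, pvEvens, pvOdds]
  | cons x r ih =>
    intro s
    rw [PySem.List.enumerate_cons, List.countP_cons, ih (s + 1)]
    by_cases he : (s % 2 == 0) = true
    · have hs : s % 2 = 0 := by simpa using he
      have ho : ¬ ((s + 1) % 2 == 0) = true := by simp; omega
      have hm : pvMatchP (s, x) = (x == "1") := by simp [pvMatchP, he]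
      simp only [he, ho, if_true, hm, pvEvens, pvOdds, List.count_cons]
      by_cases hx : (x == "1") = true <;> simp [hx] <;> omega
    · have hs : s % 2 ≠ 0 := by simpa using he
      have ho : ((s + 1) % 2 == 0) = true := by simp; omega
      have hm : pvMatchP (s, x) = (x == "0") := by simp [pvMatchP, he]
      simp only [he, ho, if_true, hm, pvEvens, pvOdds, List.count_cons]
      by_cases hx : (x == "0") = true <;> simp [hx] <;> omega

-- two-step list induction used for the slice characterisations
theorem pvTwoStep {α : Type} {P : List α → Prop} (h0 : P []) (h1 : ∀ x, P [x])
    (h2 : ∀ x y r, P r → P (x :: y :: r)) : ∀ xs, P xs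
  | [] => h0
  | [x] => h1 x
  | x :: y :: r => h2 x y r (pvTwoStep h0 h1 h2 r)

theorem pvAux_evens : ∀ (xs : List String),
    List.filterMap (fun k => xs[2 * k]?) (List.range ((xs.length + 1) / 2)) = pvEvens xs := by
  refine pvTwoStep ?_ ?_ ?_
  · simp [pvEvens]
  · intro x; simp [pvEvens, pvOdds, List.filterMap]
  · intro x y r ih
    have hc : ((x :: y :: r).length + 1) / 2 = (r.length + 1) / 2 + 1 := by
      simp only [List.length_cons]; omega
    rw [hc, List.range_succ_eq_map, List.filterMap_cons, List.filterMap_map]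
    have h0 : (x :: y :: r)[2 * 0]? = some x := rfl
    rw [h0]
    have hf : ((fun k => (x :: y :: r)[2 * k]?) ∘ (fun i => i + 1)) = (fun k => r[2 * k]?) := by
      funext k
      have h2k : 2 * (k + 1) = (2 * k) + 1 + 1 := by omega
      simp [Function.comp, h2k]
    rw [hf, ih]
    rfl

theorem pvAux_odds : ∀ (xs : List String),
    List.filterMap (fun k => xs[2 * k + 1]?) (List.range (xs.length / 2)) = pvOdds xs := by
  refine pvTwoStep ?_ ?_ ?_
  · simp [pvOdds]
  · intro x; simp [pvOdds, pvEvens]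
  · intro x y r ih
    have hc : (x :: y :: r).length / 2 = r.length / 2 + 1 := by
      simp only [List.length_cons]; omega
    rw [hc, List.range_succ_eq_map, List.filterMap_cons, List.filterMap_map]
    have h0 : (x :: y :: r)[2 * 0 + 1]? = some y := rfl
    rw [h0]
    have hf : ((fun k => (x :: y :: r)[2 * k + 1]?) ∘ (fun i => i + 1)) = (fun k => r[2 * k + 1]?) := by
      funext k
      have h2k : 2 * (k + 1) + 1 = (2 * k + 1) + 1 + 1 := by omega
      simp [Function.comp, h2k]
    rw [hf, ih]
    rfl

theorem pvSlice_evens (xs : List String) :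
    (PySem.List.slice? xs (some 0) none 2).getD [] = pvEvens xs := by
  simp only [PySem.List.slice?, PySem.List.sliceIndices]
  norm_num
  have hc : (if 0 < xs.length then (((xs.length : Int) + 2 - 1) / 2).toNat else 0)
      = (xs.length + 1) / 2 := by split_ifs <;> omega
  have hf : (fun k : Nat => xs[((2 : Int) * (k : Int)).toNat]?) = (fun k => xs[2 * k]?) := by
    funext k
    have : ((2 : Int) * (k : Int)).toNat = 2 * k := by omega
    rw [this]
  rw [hc, hf, pvAux_evens]

theorem pvSlice_odds (xs : List String) :
    (PySem.List.slice? xs (some 1) none 2).getD [] = pvOdds xs := by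
  simp only [PySem.List.slice?, PySem.List.sliceIndices]
  norm_num
  have hc : (if 1 < xs.length then (((xs.length : Int) - min 1 (xs.length : Int) + 2 - 1) / 2).toNat else 0)
      = xs.length / 2 := by split_ifs <;> omega
  rw [hc]
  rcases xs with _ | ⟨x, r⟩
  · simp [pvOdds]
  · have hm : min (1 : Int) ((x :: r).length : Int) = 1 := by
      simp
    have hf : (fun k : Nat => (x :: r)[(min (1 : Int) ((x :: r).length : Int) + 2 * (k : Int)).toNat]?)
        = (fun k => (x :: r)[2 * k + 1]?) := by
      funext k
      have : (min (1 : Int) ((x :: r).length : Int) + 2 * (k : Int)).toNat = 2 * k + 1 := by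
        rw [hm]; omega
      rw [this]
    rw [hf, pvAux_odds]

-- ===== VERDICT (by name: the statement is the Claim_ definition above) =====
theorem calculate_flips_spec : Claim_equal_calculate_flips := by
  intro dq _
  unfold Spec_calculate_flips calculate_flips calculate_flips_alt
  have h0 := pvEnumCount dq 0
  norm_num at h0
  simp only [pvA_foldl, pvSlice_evens, pvSlice_odds, pvCount_bridge, h0,
    PySem.List.length_pyRange_one, PySem.List.count_eq]
  push_cast
  omega
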